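-- pv_equiv track=rewrite | github.com/DiannaMcNair/cot-4500-intro | src/main/intro_to_python.py | create_second_matrix
-- ===== SOURCE A (Python) =====
-- def create_second_matrix(og_matrix):
--     i = 0
--     j = 0
--
--     new_matrix = og_matrix
--     for row in new_matrix:
--         j=0
--
--         for column in row:
--             if i != j:
--                 new_matrix[i][j] += 3
--
--             j+=1
--         i+=1
--
--     return new_matrix
-- ===== SOURCE B (Python) =====
-- def create_second_matrix(og_matrix):
--     # pass 1: add 3 to every entry (in place, keeping the row objects)
--     for row in og_matrix:
--         row[:] = [x + 3 for x in row]
--     # pass 2: undo the +3 on the diagonal cells that exist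
--     for i, row in enumerate(og_matrix):
--         if i < len(row):
--             row[i] -= 3
--     return og_matrix
-- ===== Notes on version B (the rewrite author's own statement) =====
-- stated objective: alternative
-- what changed: The single guarded nested loop (add 3 only when i != j) is replaced by two unconditional passes: add 3 to every entry, then subtract 3 back on each existing diagonal cell.
import Mathlib
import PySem

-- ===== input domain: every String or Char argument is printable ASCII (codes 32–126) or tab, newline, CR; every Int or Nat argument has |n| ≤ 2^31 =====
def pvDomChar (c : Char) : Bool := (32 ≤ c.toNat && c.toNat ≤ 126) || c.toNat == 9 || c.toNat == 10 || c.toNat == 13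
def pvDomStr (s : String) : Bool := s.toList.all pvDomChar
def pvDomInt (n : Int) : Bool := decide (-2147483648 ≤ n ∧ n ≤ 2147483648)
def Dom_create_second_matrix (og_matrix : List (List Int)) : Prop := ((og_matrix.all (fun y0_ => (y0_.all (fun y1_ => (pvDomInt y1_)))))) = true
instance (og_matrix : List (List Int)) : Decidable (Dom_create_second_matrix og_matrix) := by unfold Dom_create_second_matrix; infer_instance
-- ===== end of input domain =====

-- B changes: one guarded pass (add 3 iff i != j) becomes two unconditional passes (+3 everywhere, then -3 on existing diagonal cells).
-- Both Pythons mutate og_matrix in place and return it; the equivalence proved here is about the returned value.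

-- ===== PORT A =====
-- inner loop: for column in row, j counting up; add 3 when i != j
def pvAddOff (i : Nat) (j : Nat) : List Int → List Int
  | [] => []
  | x :: xs => (if i ≠ j then x + 3 else x) :: pvAddOff i (j + 1) xs

-- outer loop: for row in new_matrix, i counting up
def pvRowsA (i : Nat) : List (List Int) → List (List Int)
  | [] => []
  | row :: rest => pvAddOff i 0 row :: pvRowsA (i + 1) rest

def create_second_matrix (og_matrix : List (List Int)) : List (List Int) :=
  pvRowsA 0 og_matrix

-- ===== PORT B =====
-- pass 2: for i, row in enumerate(...): if i < len(row): row[i] -= 3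
def pvFixDiag (i : Nat) : List (List Int) → List (List Int)
  | [] => []
  | row :: rest =>
      (if i < row.length then row.set i (row.getD i 0 - 3) else row) :: pvFixDiag (i + 1) rest

def create_second_matrix_alt (og_matrix : List (List Int)) : List (List Int) :=
  pvFixDiag 0 (og_matrix.map (fun row => row.map (fun x => x + 3)))

-- ===== PRECONDITION & SPEC =====
def Spec_create_second_matrix (og_matrix : List (List Int)) (out : List (List Int)) : Prop := out = create_second_matrix_alt og_matrix
instance (og_matrix : List (List Int)) (out : List (List Int)) : Decidable (Spec_create_second_matrix og_matrix out) := by unfold Spec_create_second_matrix; infer_instance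

-- ===== CLAIM (what is proved, stated in full; the proofs are below) =====
def Claim_equal_create_second_matrix : Prop := ∀ (og_matrix : List (List Int)), Dom_create_second_matrix og_matrix → Spec_create_second_matrix og_matrix (create_second_matrix og_matrix)

-- ===== LEMMAS AND PROOFS =====

-- A's inner loop at offset j = +3 everywhere, with the diagonal cell (index i - j, if it exists) left alone
theorem pvAddOff_eq : ∀ (row : List Int) (i j : Nat),
    pvAddOff i j row =
      if j ≤ i ∧ i - j < row.length then
        (row.map (fun x => x + 3)).set (i - j) ((row.map (fun x => x + 3)).getD (i - j) 0 - 3)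
      else row.map (fun x => x + 3) := by
  intro row
  induction row with
  | nil => intro i j; simp [pvAddOff]
  | cons x xs ih =>
    intro i j
    simp only [pvAddOff, List.map_cons]
    by_cases hij : i = j
    · subst hij
      rw [if_neg (by simp)]
      rw [if_pos (by constructor <;> simp)]
      have h0 : i - i = 0 := by omega
      have hrec : pvAddOff i (i + 1) xs = xs.map (fun x => x + 3) := by
        rw [ih]; rw [if_neg]; omega
      simp [hrec]
    · rw [if_pos (by exact hij), ih i (j + 1)]
      by_cases hc : j + 1 ≤ i ∧ i - (j + 1) < xs.length
      · rw [if_pos hc]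
        rw [if_pos (by constructor <;> [omega; (simp; omega)])]
        have hpos : i - j = (i - (j + 1)) + 1 := by omega
        simp [hpos]
      · rw [if_neg hc]
        rw [if_neg]
        intro h
        obtain ⟨h1, h2⟩ := h
        simp only [List.length_cons] at h2
        exact hc ⟨by omega, by omega⟩

theorem pvRowsA_eq : ∀ (rows : List (List Int)) (i : Nat),
    pvRowsA i rows = pvFixDiag i (rows.map (fun row => row.map (fun x => x + 3))) := by
  intro rows
  induction rows with
  | nil => intro i; simp [pvRowsA, pvFixDiag]
  | cons row rest ih =>
    intro i
    simp only [pvRowsA, List.map_cons, pvFixDiag, ih (i + 1)]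
    congr 1
    rw [pvAddOff_eq row i 0]
    simp [List.length_map]

-- ===== VERDICT (by name: the statement is the Claim_ definition above) =====
theorem create_second_matrix_spec : Claim_equal_create_second_matrix := by
  intro og _
  unfold Spec_create_second_matrix create_second_matrix create_second_matrix_alt
  exact pvRowsA_eq og 0
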